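-- pv_equiv track=rewrite | github.com/markw/advent-of-code-2022 | 23/part1.py | rounds
-- ===== SOURCE A (Python) =====
-- def is_none_or_empty(a):
--     return a == None or len(a) == 0
--
-- def second(a):
--     return None if is_none_or_empty(a) else a[1]
--
-- def add(a,b):
--     return(a[0]+b[0], a[1]+b[1])
--
-- def rotate(xs):
--     xs1 = xs[1:]
--     xs1.append(xs[0])
--     return xs1
--
-- def has_neighbors(e, elves, rules):
--     for r in rules:
--         for s in r:
--             if add(s,e) in elves:
--                 return True
--     return False
--
-- def propose_move(e, elves, rules):
--
--     def conflict(moves):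
--         for m in moves:
--             if m in elves:
--                 return True
--         return False
--
--     for r in rules:
--         moves = [add(s,e) for s in r]
--         if not conflict(moves):
--             return (e, moves[0])
--     return (e,e)
--
-- def propose_moves(elves, rules):
--     proposed_moves = set()
--     for e in elves:
--         if not has_neighbors(e, elves, rules):
--             proposed_moves.add((e,e))
--         else:
--             proposed_moves.add(propose_move(e, elves, rules))
--     return proposed_moves
--
-- def invalid_dests(moves):
--     invalid, seen = set(), set()
--     for d in map(second, moves):
--         if d in seen:
--             invalid.add(d)
--         seen.add(d)
--     return invalid
--
-- def rounds(n, elves, rules):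
--     if n == 0:
--         return elves
--     proposed = propose_moves(elves, rules)
--     invalid = invalid_dests(proposed)
--     moves = set()
--     for m in proposed:
--         if m[1] in invalid:
--             moves.add(m[0])
--         else:
--             moves.add(m[1])
--     return rounds(n-1, moves, rotate(rules))
-- ===== SOURCE B (Python) =====
-- def _dest(e, occ, rs):
--     # one fused pass over rs: tracks 'no neighbour anywhere' and the first
--     # conflict-free rule's destination; stops as soon as both are known
--     stay = True
--     first = None
--     for r in rs:
--         if any((s[0] + e[0], s[1] + e[1]) in occ for s in r):
--             stay = False
--             if first is not None:
--                 break
--         elif first is None: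
--             first = (r[0][0] + e[0], r[0][1] + e[1])
--     return e if stay or first is None else first
--
-- def rounds(n, elves, rules):
--     current, rs = elves, rules
--     for _ in range(n):
--         pairs = [(e, _dest(e, current, rs)) for e in current]
--         counts = {}
--         for _, d in pairs:
--             counts[d] = counts.get(d, 0) + 1
--         nxt = set()
--         for e, d in pairs:
--             nxt.add(d if counts[d] == 1 else e)
--         current = nxt
--         rs = rs[1:] + rs[:1]
--     return current
-- ===== Notes on version B (the rewrite author's own statement) =====
-- stated objective: alternative
-- what changed: B replaces A's recursion with an iterative round loop and, per round, fuses A's two scans per elf (has_neighbors then propose_move) into one pass over the rules while replacing the invalid/seen duplicate-destination sets with a destination-count dictionary.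
-- outside the precondition, e.g. on rounds(1, {(0, 0)}, [[]]): A returns {(0, 0)}, B raises IndexError
import Mathlib
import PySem

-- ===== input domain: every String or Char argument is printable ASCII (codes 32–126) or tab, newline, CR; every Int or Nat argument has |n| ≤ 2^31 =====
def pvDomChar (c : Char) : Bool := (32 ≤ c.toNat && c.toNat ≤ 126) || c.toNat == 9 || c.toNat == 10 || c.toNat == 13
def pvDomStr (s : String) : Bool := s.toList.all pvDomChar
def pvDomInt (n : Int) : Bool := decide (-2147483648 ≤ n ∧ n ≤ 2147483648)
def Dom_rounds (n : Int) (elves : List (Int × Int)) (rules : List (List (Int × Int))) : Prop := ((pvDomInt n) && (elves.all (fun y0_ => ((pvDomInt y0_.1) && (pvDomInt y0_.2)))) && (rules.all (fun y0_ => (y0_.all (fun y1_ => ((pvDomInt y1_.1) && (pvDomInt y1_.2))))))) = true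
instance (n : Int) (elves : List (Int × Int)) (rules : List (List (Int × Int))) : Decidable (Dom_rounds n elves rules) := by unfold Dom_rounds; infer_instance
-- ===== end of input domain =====

-- B replaces A's recursion by an iterative round loop and fuses has_neighbors/propose_move
-- into one pass per elf with a destination counter instead of invalid/seen sets (objective: alternative).


-- ===== PORT A =====
-- add(a, b)
def pvAdd (a b : Int × Int) : Int × Int := (a.1 + b.1, a.2 + b.2)

-- rotate(xs); Python xs[0] raises IndexError on [] — under Pre_ the list is nonempty (headD [] is junk outside Pre_)
def pvRotate (xs : List (List (Int × Int))) : List (List (Int × Int)) :=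
  xs.drop 1 ++ [xs.headD []]

-- has_neighbors(e, elves, rules)
def pvHasNeighbors (e : Int × Int) (elves : List (Int × Int)) (rules : List (List (Int × Int))) : Bool :=
  rules.any (fun r => r.any (fun s => elves.contains (pvAdd s e)))

-- propose_move(e, elves, rules); moves[0] raises IndexError on an empty rule — outside Pre_ (headD e is junk there)
def pvProposeMove (e : Int × Int) (elves : List (Int × Int)) : List (List (Int × Int)) → (Int × Int) × (Int × Int)
  | [] => (e, e)
  | r :: rs =>
    let moves := r.map (fun s => pvAdd s e)
    if moves.any (fun m => elves.contains m) then pvProposeMove e elves rs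
    else (e, moves.headD e)

-- propose_moves(elves, rules)
def pvProposeMoves (elves : List (Int × Int)) (rules : List (List (Int × Int))) : PySem.Set ((Int × Int) × (Int × Int)) :=
  elves.foldl (fun acc e =>
    if !(pvHasNeighbors e elves rules) then PySem.Set.add acc (e, e)
    else PySem.Set.add acc (pvProposeMove e elves rules)) PySem.Set.empty

-- invalid_dests(moves); second(m) on the 2-tuples in the set is m.2
def pvInvalidDests (moves : List ((Int × Int) × (Int × Int))) : PySem.Set (Int × Int) :=
  ((moves.map (fun m => m.2)).foldl
    (fun (st : PySem.Set (Int × Int) × PySem.Set (Int × Int)) d =>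
      (if PySem.Set.contains st.2 d then PySem.Set.add st.1 d else st.1, PySem.Set.add st.2 d))
    (PySem.Set.empty, PySem.Set.empty)).1

-- rounds(n, elves, rules); Python tests n == 0 and diverges (RecursionError) for n < 0 — outside Pre_,
-- so the guard is written n ≤ 0 to make the port total
def rounds (n : Int) (elves : List (Int × Int)) (rules : List (List (Int × Int))) : List (Int × Int) :=
  if n ≤ 0 then elves
  else
    let proposed := pvProposeMoves elves rules
    let invalid := pvInvalidDests proposed
    let moves := proposed.foldl (fun acc m =>
      if PySem.Set.contains invalid m.2 then PySem.Set.add acc m.1 else PySem.Set.add acc m.2)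
      PySem.Set.empty
    rounds (n - 1) moves (pvRotate rules)
termination_by n.toNat
decreasing_by omega

-- ===== PORT B =====
-- _dest(e, occ, rs): one fused pass over rs with early exit (the for/break loop as structural
-- recursion over rs, carrying stay/first); Python r[0] raises IndexError on an empty rule —
-- outside Pre_ (headD (0,0) is junk there)
def pvDestLoop (e : Int × Int) (occ : List (Int × Int)) :
    List (List (Int × Int)) → Bool → Option (Int × Int) → Bool × Option (Int × Int)
  | [], stay, first => (stay, first)
  | r :: rs, stay, first =>
    if r.any (fun s => occ.contains (s.1 + e.1, s.2 + e.2)) then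
      if first.isSome then (false, first)
      else pvDestLoop e occ rs false first
    else if first.isNone then
      pvDestLoop e occ rs stay (some ((r.headD (0, 0)).1 + e.1, (r.headD (0, 0)).2 + e.2))
    else pvDestLoop e occ rs stay first

def pvDest (e : Int × Int) (occ : List (Int × Int)) (rs : List (List (Int × Int))) : Int × Int :=
  let st := pvDestLoop e occ rs true none
  if st.1 || st.2.isNone then e else st.2.getD e

-- one round body of B's loop
def pvStep (current : List (Int × Int)) (rs : List (List (Int × Int))) : List (Int × Int) :=
  let pairs := current.map (fun e => (e, pvDest e current rs))
  let counts := pairs.foldl (fun d p => PySem.Dict.modify d p.2 (0 : Int) (· + 1)) PySem.Dict.empty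
  pairs.foldl (fun nxt p =>
    PySem.Set.add nxt (if PySem.Dict.getD counts p.2 0 == (1 : Int) then p.2 else p.1)) PySem.Set.empty

-- rounds(n, elves, rules), iterative: for _ in range(n): … ; rs = rs[1:] + rs[:1]
def rounds_alt (n : Int) (elves : List (Int × Int)) (rules : List (List (Int × Int))) : List (Int × Int) :=
  ((PySem.List.pyRange 0 n).foldl
    (fun (st : List (Int × Int) × List (List (Int × Int))) _ =>
      (pvStep st.1 st.2, PySem.List.slice st.2 (some 1) none ++ PySem.List.slice st.2 none (some 1)))
    (elves, rules)).1

-- ===== PRECONDITION & SPEC =====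
-- Pre_ excludes: n < 0 and n > 0 with rules == [] (A raises RecursionError resp. IndexError there);
-- elves lists with duplicates (elves is a Python set, so its List encoding holds distinct elements);
-- and rules containing an empty offset list, on which A raises IndexError as soon as some elf with a
-- neighbour reaches it while on the remaining such inputs A happens to return (B raises IndexError there).
def Pre_rounds (n : Int) (elves : List (Int × Int)) (rules : List (List (Int × Int))) : Prop :=
  0 ≤ n ∧ elves.Nodup ∧ (n = 0 ∨ (rules ≠ [] ∧ [] ∉ rules))
instance (n : Int) (elves : List (Int × Int)) (rules : List (List (Int × Int))) : Decidable (Pre_rounds n elves rules) := by unfold Pre_rounds; infer_instance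

def pvWitness_rounds : Int × (List (Int × Int)) × (List (List (Int × Int))) :=
  (1, [(0, 0), (1, 0)], [[(-1, -1), (-1, 0), (-1, 1)], [(1, -1), (1, 0), (1, 1)]])

def Spec_rounds (n : Int) (elves : List (Int × Int)) (rules : List (List (Int × Int))) (out : List (Int × Int)) : Prop := out = rounds_alt n elves rules
instance (n : Int) (elves : List (Int × Int)) (rules : List (List (Int × Int))) (out : List (Int × Int)) : Decidable (Spec_rounds n elves rules out) := by unfold Spec_rounds; infer_instance

-- ===== CLAIM (what is proved, stated in full; the proofs are below) =====
def Claim_equal_rounds : Prop := ∀ (n : Int) (elves : List (Int × Int)) (rules : List (List (Int × Int))), Dom_rounds n elves rules → Pre_rounds n elves rules → Spec_rounds n elves rules (rounds n elves rules)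

-- ===== LEMMAS AND PROOFS =====

-- first conflict-free rule's destination, as A's propose_move computes it
def pvFirstFree (e : Int × Int) (occ : List (Int × Int)) : List (List (Int × Int)) → Option (Int × Int)
  | [] => none
  | r :: rs =>
    let moves := r.map (fun s => pvAdd s e)
    if moves.any (fun m => occ.contains m) then pvFirstFree e occ rs
    else some (moves.headD e)

theorem hn_cons (e : Int × Int) (occ : List (Int × Int)) (r : List (Int × Int)) (rs : List (List (Int × Int))) :
    pvHasNeighbors e occ (r :: rs)
      = (((r.map (fun s => (s.1 + e.1, s.2 + e.2))).any (fun m => occ.contains m)) || pvHasNeighbors e occ rs) := by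
  simp only [pvHasNeighbors, List.any_cons, List.any_map, Function.comp_def, pvAdd]

theorem ff_cons (e : Int × Int) (occ : List (Int × Int)) (r : List (Int × Int)) (rs : List (List (Int × Int))) :
    pvFirstFree e occ (r :: rs)
      = (if ((r.map (fun s => (s.1 + e.1, s.2 + e.2))).any (fun m => occ.contains m)) = true
         then pvFirstFree e occ rs
         else some ((r.map (fun s => (s.1 + e.1, s.2 + e.2))).headD e)) := by
  simp only [pvFirstFree, List.any_map, Function.comp_def, pvAdd]

theorem destLoop_eq (e : Int × Int) (occ : List (Int × Int)) :
    ∀ (rs : List (List (Int × Int))) (b : Bool) (o : Option (Int × Int)),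
      pvDestLoop e occ rs b o
        = (b && !(pvHasNeighbors e occ rs), o.or (pvFirstFree e occ rs)) := by
  intro rs
  induction rs with
  | nil => intro b o; simp [pvDestLoop, pvHasNeighbors, pvFirstFree]
  | cons r rs ih =>
    intro b o
    rw [pvDestLoop, hn_cons, ff_cons]
    have hmap : (r.map (fun s => (s.1 + e.1, s.2 + e.2)) : List (Int × Int)).any (fun m => occ.contains m)
        = r.any (fun s => occ.contains (s.1 + e.1, s.2 + e.2)) := by
      simp [List.any_map, Function.comp_def]
    rw [hmap]
    by_cases hc : r.any (fun s => occ.contains (s.1 + e.1, s.2 + e.2)) = true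
    · rw [if_pos hc, if_pos hc]
      cases o with
      | some v => rw [hc]; simp
      | none =>
        simp only [Option.isSome_none, Bool.false_eq_true, if_false]
        rw [ih]
        rw [hc]
        simp
    · rw [if_neg hc, if_neg hc]
      cases o with
      | none =>
        simp only [Option.isNone_none, if_true]
        rw [ih]
        have hhead : ((r.headD (0, 0)).1 + e.1, (r.headD (0, 0)).2 + e.2)
            = (r.map (fun s => (s.1 + e.1, s.2 + e.2))).headD e := by
          cases r <;> simp
        rw [Bool.not_eq_true] at hc
        rw [hc, hhead]
        simp
      | some v =>
        simp only [Option.isNone_some, Bool.false_eq_true, if_false]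
        rw [ih]
        rw [Bool.not_eq_true] at hc
        rw [hc]
        simp

theorem proposeMove_eq (e : Int × Int) (occ : List (Int × Int)) :
    ∀ rs, pvProposeMove e occ rs = (e, (pvFirstFree e occ rs).getD e) := by
  intro rs
  induction rs with
  | nil => rfl
  | cons r rs ih =>
    simp only [pvProposeMove, pvFirstFree]
    split <;> simp [ih]

theorem pair_eq (e : Int × Int) (occ : List (Int × Int)) (rules : List (List (Int × Int))) :
    (if !(pvHasNeighbors e occ rules) then (e, e) else pvProposeMove e occ rules)
      = (e, pvDest e occ rules) := by
  simp only [pvDest]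
  rw [destLoop_eq]
  rw [proposeMove_eq]
  by_cases hn : pvHasNeighbors e occ rules
  · cases hff : pvFirstFree e occ rules
    · simp [hn]
    · simp [hn]
  · simp [hn]

theorem foldl_add_map {α β : Type} [BEq β] (f : α → β) (xs : List α) :
    xs.foldl (fun acc x => PySem.Set.add acc (f x)) PySem.Set.empty
      = PySem.Set.ofList (xs.map f) := by
  rw [PySem.Set.ofList_eq_foldl, List.foldl_map]; rfl

theorem foldl_add_pairs (f : (Int × Int) → (Int × Int) × (Int × Int))
    (hf : ∀ x, (f x).1 = x) :
    ∀ (xs : List (Int × Int)) (acc : List ((Int × Int) × (Int × Int))),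
      xs.Nodup → (∀ x ∈ xs, ∀ q ∈ acc, q.1 ≠ x) →
      xs.foldl (fun a x => PySem.Set.add a (f x)) acc = acc ++ xs.map f := by
  intro xs
  induction xs with
  | nil => simp
  | cons x xs ih =>
    intro acc hnd hacc
    rw [List.foldl_cons]
    have hni : PySem.Set.add acc (f x) = acc ++ [f x] := by
      rw [PySem.Set.add, if_neg]
      intro hmem
      have : f x ∈ acc := by simpa [PySem.Set.contains] using hmem
      exact hacc x (by simp) _ this (hf x)
    rw [hni, ih (acc ++ [f x]) (List.nodup_cons.mp hnd).2]
    · simp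
    · intro x' hx' q hq
      rcases List.mem_append.mp hq with h | h
      · exact hacc x' (by simp [hx']) q h
      · simp only [List.mem_singleton] at h
        subst h
        rw [hf x]
        exact fun hxx => (List.nodup_cons.mp hnd).1 (hxx ▸ hx')

theorem proposeMoves_eq (elves : List (Int × Int)) (rules : List (List (Int × Int)))
    (h : elves.Nodup) :
    pvProposeMoves elves rules = elves.map (fun e => (e, pvDest e elves rules)) := by
  unfold pvProposeMoves
  rw [PySem.List.foldl_congr_mem elves _
    (fun acc e => PySem.Set.add acc (e, pvDest e elves rules)) _
    (fun acc e _ => by rw [← apply_ite (PySem.Set.add acc), pair_eq])]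
  rw [foldl_add_pairs (fun e => (e, pvDest e elves rules)) (fun _ => rfl) elves
    PySem.Set.empty h (fun x _ q hq => by simp [PySem.Set.empty] at hq)]
  simp [PySem.Set.empty]

theorem invalid_mem (ds : List (Int × Int)) (d : Int × Int) :
    ∀ (inv seen : PySem.Set (Int × Int)),
      d ∈ (ds.foldl
        (fun (st : PySem.Set (Int × Int) × PySem.Set (Int × Int)) x =>
          (if PySem.Set.contains st.2 x then PySem.Set.add st.1 x else st.1, PySem.Set.add st.2 x))
        (inv, seen)).1
      ↔ d ∈ inv ∨ (d ∈ seen ∧ d ∈ ds) ∨ 2 ≤ ds.count d := by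
  induction ds with
  | nil => intro inv seen; simp
  | cons d0 ds ih =>
    intro inv seen
    rw [List.foldl_cons]
    dsimp only
    by_cases hs : PySem.Set.contains seen d0 = true
    · rw [if_pos hs]
      rw [ih]
      have hs' : d0 ∈ seen := by simpa [PySem.Set.contains] using hs
      by_cases hd : d = d0
      · subst hd
        have h1 : d ∈ PySem.Set.add inv d := by simp [PySem.Set.mem_add]
        have h2 : d ∈ PySem.Set.add seen d := by simp [PySem.Set.mem_add]
        simp [h1, hs']
      · simp only [PySem.Set.mem_add, List.mem_cons, List.count_cons]
        have : (d0 == d) = false := by simp [Ne.symm hd]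
        simp only [this]
        tauto
    · rw [if_neg hs]
      rw [ih]
      have hs' : d0 ∉ seen := by simpa [PySem.Set.contains] using hs
      by_cases hd : d = d0
      · subst hd
        have h2 : d ∈ PySem.Set.add seen d := by simp [PySem.Set.mem_add]
        have hcount : (d :: ds).count d = ds.count d + 1 := by simp
        have hmemc : d ∈ ds ↔ 1 ≤ ds.count d := Iff.symm List.one_le_count_iff
        simp only [h2, true_and, hs', false_and, false_or, hcount, hmemc, List.mem_cons,
          true_or]
        by_cases hi : d ∈ inv
        · simp [hi]
        · simp only [hi, false_or]
          omega
      · simp only [PySem.Set.mem_add, List.mem_cons, List.count_cons]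
        have : (d0 == d) = false := by simp [Ne.symm hd]
        simp [this, hd]

theorem invalid_contains (ms : List ((Int × Int) × (Int × Int))) (d : Int × Int) :
    PySem.Set.contains (pvInvalidDests ms) d = true ↔ 2 ≤ (ms.map (fun m => m.2)).count d := by
  unfold pvInvalidDests
  have : PySem.Set.contains ((((ms.map (fun m => m.2))).foldl
      (fun (st : PySem.Set (Int × Int) × PySem.Set (Int × Int)) x =>
        (if PySem.Set.contains st.2 x then PySem.Set.add st.1 x else st.1, PySem.Set.add st.2 x))
      (PySem.Set.empty, PySem.Set.empty)).1) d = true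
      ↔ d ∈ (((ms.map (fun m => m.2))).foldl
      (fun (st : PySem.Set (Int × Int) × PySem.Set (Int × Int)) x =>
        (if PySem.Set.contains st.2 x then PySem.Set.add st.1 x else st.1, PySem.Set.add st.2 x))
      (PySem.Set.empty, PySem.Set.empty)).1 := by
    simp [PySem.Set.contains]
  rw [this, invalid_mem]
  simp [PySem.Set.empty]

theorem counts_getD (pairs : List ((Int × Int) × (Int × Int))) (d : Int × Int) :
    PySem.Dict.getD (pairs.foldl (fun d p => PySem.Dict.modify d p.2 (0 : Int) (· + 1)) PySem.Dict.empty) d 0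
      = ((pairs.map (fun p => p.2)).count d : Int) := by
  rw [show (pairs.foldl (fun d p => PySem.Dict.modify d p.2 (0 : Int) (· + 1)) PySem.Dict.empty)
      = PySem.Dict.counter (pairs.map (fun p => p.2)) by
    rw [PySem.Dict.counter_eq_foldl, List.foldl_map]]
  exact PySem.Dict.getD_counter _ _

theorem step_eq (elves : List (Int × Int)) (rules : List (List (Int × Int)))
    (h : elves.Nodup) :
    (pvProposeMoves elves rules).foldl (fun acc m =>
        if PySem.Set.contains (pvInvalidDests (pvProposeMoves elves rules)) m.2
        then PySem.Set.add acc m.1 else PySem.Set.add acc m.2) PySem.Set.empty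
      = pvStep elves rules := by
  have pvStep_def : pvStep elves rules
      = (elves.map (fun e => (e, pvDest e elves rules))).foldl
          (fun nxt p => PySem.Set.add nxt
            (if PySem.Dict.getD ((elves.map (fun e => (e, pvDest e elves rules))).foldl
                 (fun d p => PySem.Dict.modify d p.2 (0 : Int) (· + 1)) PySem.Dict.empty) p.2 0 == 1
             then p.2 else p.1)) PySem.Set.empty := rfl
  rw [pvStep_def, proposeMoves_eq elves rules h]
  apply PySem.List.foldl_congr_mem
  intro acc p hp
  rw [counts_getD (elves.map (fun e => (e, pvDest e elves rules))) p.2]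
  have hmem : p.2 ∈ (elves.map (fun e => (e, pvDest e elves rules))).map (fun p => p.2) :=
    List.mem_map_of_mem hp
  have hge1 : 1 ≤ ((elves.map (fun e => (e, pvDest e elves rules))).map (fun p => p.2)).count p.2 :=
    List.one_le_count_iff.mpr hmem
  by_cases h2 : 2 ≤ ((elves.map (fun e => (e, pvDest e elves rules))).map (fun p => p.2)).count p.2
  · rw [if_pos ((invalid_contains _ _).mpr h2)]
    have : (((((elves.map (fun e => (e, pvDest e elves rules))).map (fun p => p.2)).count p.2 : Int)) == 1) = false := by
      simp only [beq_eq_false_iff_ne, ne_eq]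
      intro hx
      omega
    rw [this, if_neg (by simp)]
  · have hc1 : ((elves.map (fun e => (e, pvDest e elves rules))).map (fun p => p.2)).count p.2 = 1 := by omega
    rw [if_neg (by rw [invalid_contains]; omega)]
    rw [hc1]
    simp

theorem step_nodup (elves : List (Int × Int)) (rules : List (List (Int × Int))) :
    (pvStep elves rules).Nodup := by
  unfold pvStep
  rw [foldl_add_map]
  exact PySem.Set.nodup_ofList _

theorem pyRange_nil {a b : Int} (h : b ≤ a) : PySem.List.pyRange a b = [] := by
  simp [PySem.List.pyRange]
  omega

theorem foldl_ignore_shift {σ : Type} (G : σ → σ) :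
    ∀ (k : Nat) (a b a' b' : Int) (st : σ), (b - a).toNat = k → (b' - a').toNat = k →
      (PySem.List.pyRange a b).foldl (fun s (_ : Int) => G s) st
        = (PySem.List.pyRange a' b').foldl (fun s (_ : Int) => G s) st := by
  intro k
  induction k with
  | zero =>
    intro a b a' b' st h1 h2
    rw [pyRange_nil (by omega), pyRange_nil (by omega)]
  | succ k ih =>
    intro a b a' b' st h1 h2
    rw [PySem.List.pyRange_one_cons (a := a) (b := b) (by omega),
      PySem.List.pyRange_one_cons (a := a') (b := b') (by omega)]
    simp only [List.foldl_cons]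
    exact ih (a + 1) b (a' + 1) b' (G st) (by omega) (by omega)

theorem alt_unroll (n : Int) (elves : List (Int × Int)) (rules : List (List (Int × Int)))
    (hn : 0 < n) :
    rounds_alt n elves rules
      = rounds_alt (n - 1) (pvStep elves rules)
          (PySem.List.slice rules (some 1) none ++ PySem.List.slice rules none (some 1)) := by
  unfold rounds_alt
  rw [PySem.List.pyRange_one_cons hn]
  rw [List.foldl_cons]
  dsimp only
  rw [foldl_ignore_shift
    (G := fun (st : List (Int × Int) × List (List (Int × Int))) =>
      (pvStep st.1 st.2, PySem.List.slice st.2 (some 1) none ++ PySem.List.slice st.2 none (some 1)))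
    (n - 1).toNat (0 + 1) n 0 (n - 1) _ (by omega) (by omega)]

theorem rot_eq (rules : List (List (Int × Int))) (h : rules ≠ []) :
    PySem.List.slice rules (some 1) none ++ PySem.List.slice rules none (some 1)
      = pvRotate rules := by
  rw [PySem.List.slice_from rules (by norm_num), PySem.List.slice_to rules (by norm_num)]
  cases rules with
  | nil => exact absurd rfl h
  | cons r rs => simp [pvRotate]

theorem main_eq : ∀ (k : Nat) (n : Int) (elves : List (Int × Int)) (rules : List (List (Int × Int))),
    n.toNat = k → elves.Nodup → (0 < n → rules ≠ []) →
    rounds n elves rules = rounds_alt n elves rules := by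
  intro k
  induction k with
  | zero =>
    intro n elves rules hk hnd hr
    have hn : n ≤ 0 := by omega
    rw [rounds, if_pos hn]
    unfold rounds_alt
    rw [pyRange_nil hn]
    rfl
  | succ k ih =>
    intro n elves rules hk hnd hr
    have hn : 0 < n := by omega
    have hr' := hr hn
    rw [rounds, if_neg (by omega)]
    dsimp only
    rw [step_eq elves rules hnd]
    rw [alt_unroll n elves rules hn, rot_eq rules hr']
    exact ih (n - 1) (pvStep elves rules) (pvRotate rules) (by omega)
      (step_nodup elves rules) (fun _ => by simp [pvRotate])

-- ===== VERDICT (by name: the statement is the Claim_ definition above) =====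
theorem rounds_spec : Claim_equal_rounds := by
  intro n elves rules _ hpre
  obtain ⟨hn, hnd, hr⟩ := hpre
  unfold Spec_rounds
  exact main_eq n.toNat n elves rules rfl hnd (by rcases hr with h | h <;> [omega; exact fun _ => h.1])
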